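-- pv_equiv track=rewrite | github.com/mcfunley/euler | p0114.py | place
-- ===== SOURCE A (Python) =====
-- def placements(row, redsize):
--     last = len(row) - redsize
--
--     def empty(i):
--         return all([r == 0 for r in row[i:i+redsize]])
--
--     def free(i):
--         return (i == 0 or row[i-1] == 0) and (i == last or row[last+1] == 0)
--
--     return (i for i in range(0, last+1) if empty(i) and free(i))
--
-- def place(row):
--     # place one red block of all legal sizes everywhere possible then recurse
--     total = 0
--     for redsize in range(3, len(row) + 1):
--         for placement in placements(row, redsize):
--             r = row[:]
--             r[placement:placement+redsize] = [1]*redsize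
--             total += 1 + place(r)
--     return total
-- ===== SOURCE B (Python) =====
-- def place(row):
--     # Top-down dynamic programming: a memo table keyed on the row tuple means each
--     # distinct reachable row is expanded once; inside one expansion a prefix-sum
--     # table of the zero indicator replaces the per-placement slice scans.
--     memo = {}
--
--     def go(row):
--         key = tuple(row)
--         if key in memo:
--             return memo[key]
--         n = len(row)
--         # pre[b] - pre[a] == number of zeros in row[a:b]
--         pre = [0]
--         for x in row:
--             pre.append(pre[-1] + (x == 0))
--         total = 0
--         for redsize in range(3, n + 1):
--             last = n - redsize
--             tail = row[last + 1] == 0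
--             for i in range(last + 1):
--                 if (pre[i + redsize] - pre[i] == redsize
--                         and (i == 0 or row[i - 1] == 0)
--                         and (i == last or tail)):
--                     r = row[:i] + [1] * redsize + row[i + redsize:]
--                     total += 1 + go(r)
--         memo[key] = total
--         return total
--
--     return go(row)
-- ===== Notes on version B (the rewrite author's own statement) =====
-- stated objective: faster
-- what changed: B replaces A's naive exponential recursion by top-down dynamic programming (a memo table keyed on the row tuple, so each distinct reachable row is expanded once instead of once per path) and replaces the per-placement slice scans by a prefix-sum table of the zero indicator.
import Mathlib
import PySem

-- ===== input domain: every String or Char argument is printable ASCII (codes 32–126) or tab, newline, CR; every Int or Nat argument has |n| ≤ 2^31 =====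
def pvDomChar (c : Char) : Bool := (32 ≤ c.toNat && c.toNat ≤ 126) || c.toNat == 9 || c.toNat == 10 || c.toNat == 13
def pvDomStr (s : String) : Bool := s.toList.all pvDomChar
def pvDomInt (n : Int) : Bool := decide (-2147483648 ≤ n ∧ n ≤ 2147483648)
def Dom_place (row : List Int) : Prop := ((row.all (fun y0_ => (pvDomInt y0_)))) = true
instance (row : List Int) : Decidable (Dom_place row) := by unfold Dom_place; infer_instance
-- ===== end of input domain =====

-- B replaces A's naive exponential recursion by top-down memoization keyed on the row
-- (each distinct reachable row is expanded once); measured faster in a timing run.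

-- ===== PORT A =====
-- shared helper: list(placements(row, redsize)) — both Pythons contain this same helper.
-- pyGetD is exact here: whenever the guarded arms are evaluated the index is in range
-- (i ≥ 1 after the `i == 0` short-circuit; last+1 < len(row) since redsize ≥ 3).
def placementsL (row : List Int) (redsize : Int) : List Int :=
  let last : Int := (row.length : Int) - redsize
  (PySem.List.pyRange 0 (last + 1) 1).filter (fun i =>
    (PySem.List.slice row (some i) (some (i + redsize))).all (fun r => r == 0)
    && ((i == 0 || PySem.List.pyGetD row (i - 1) 0 == 0)
        && (i == last || PySem.List.pyGetD row (last + 1) 0 == 0)))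

-- shared helper: r = row[:]; r[p:p+redsize] = [1]*redsize — exact for 0 ≤ p and
-- p + redsize ≤ len(row), which holds for every p that placementsL returns.
def assign (row : List Int) (p redsize : Int) : List Int :=
  row.take p.toNat ++ List.replicate redsize.toNat 1 ++ row.drop (p.toNat + redsize.toNat)

-- A's recursion, made total with fuel; every recursive call strictly decreases the
-- number of zeros in the row (proved below), so fuel = count-zeros + 1 suffices.
def placeFuel : Nat → List Int → Int
  | 0, _ => 0
  | fuel + 1, row =>
    (PySem.List.pyRange 3 ((row.length : Int) + 1) 1).foldl (fun total redsize =>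
      (placementsL row redsize).foldl (fun total p =>
        total + (1 + placeFuel fuel (assign row p redsize))) total) 0

def place (row : List Int) : Int := placeFuel (row.count 0 + 1) row

-- ===== PORT B =====
-- B's go(): memo table keyed on the row, and a prefix-sum table `pre` of the zero
-- indicator (pre[b]-pre[a] = zeros in row[a:b]) instead of per-placement slice scans.
-- `getD` after `contains` and `pyGetD` on pre/row are exact: the indexes are in range
-- whenever evaluated (see the range facts proved below).
def placeMemo : Nat → List Int → PySem.Dict (List Int) Int →
    Int × PySem.Dict (List Int) Int
  | 0, _, cache => (0, cache)
  | fuel + 1, row, cache =>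
    if cache.contains row then (cache.getD row 0, cache)
    else
      let n : Int := (row.length : Int)
      let pre : List Int := row.foldl (fun pre x =>
        pre ++ [PySem.List.pyGetD pre (-1) 0 + (if x == 0 then 1 else 0)]) [0]
      let res :=
        (PySem.List.pyRange 3 (n + 1) 1).foldl
          (fun (tc : Int × PySem.Dict (List Int) Int) redsize =>
            let last := n - redsize
            let tail := PySem.List.pyGetD row (last + 1) 0 == 0
            (PySem.List.pyRange 0 (last + 1) 1).foldl (fun tc i =>
              if (PySem.List.pyGetD pre (i + redsize) 0 - PySem.List.pyGetD pre i 0 == redsize)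
                  && ((i == 0 || PySem.List.pyGetD row (i - 1) 0 == 0)
                  && (i == last || tail)) then
                let r := PySem.List.slice row none (some i)
                  ++ List.replicate redsize.toNat 1
                  ++ PySem.List.slice row (some (i + redsize)) none
                let vc := placeMemo fuel r tc.2
                (tc.1 + (1 + vc.1), vc.2)
              else tc) tc) (0, cache)
      (res.1, res.2.insert row res.1)

def place_alt (row : List Int) : Int :=
  (placeMemo (row.count 0 + 1) row PySem.Dict.empty).1

-- ===== PRECONDITION & SPEC =====
def Spec_place (row : List Int) (out : Int) : Prop := out = place_alt row
instance (row : List Int) (out : Int) : Decidable (Spec_place row out) := by unfold Spec_place; infer_instance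

-- ===== CLAIM (what is proved, stated in full; the proofs are below) =====
def Claim_equal_place : Prop := ∀ (row : List Int), Dom_place row → Spec_place row (place row)

-- ===== LEMMAS AND PROOFS =====

lemma assign_count_lt (row : List Int) (redsize p : Int)
    (hr : redsize ∈ PySem.List.pyRange 3 ((row.length : Int) + 1) 1)
    (hp : p ∈ placementsL row redsize) :
    (assign row p redsize).count 0 < row.count 0 := by
  rw [PySem.List.mem_pyRange_one] at hr
  unfold placementsL at hp
  simp only [List.mem_filter, PySem.List.mem_pyRange_one, Bool.and_eq_true] at hp
  obtain ⟨⟨hp0, hplt⟩, hall, -⟩ := hp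
  rw [PySem.List.slice_toNat row hp0 (by omega)] at hall
  have hkk : (p + redsize).toNat - p.toNat = redsize.toNat := by omega
  rw [hkk] at hall
  have hmidcount : ((row.drop p.toNat).take redsize.toNat).count 0
      = ((row.drop p.toNat).take redsize.toNat).length :=
    List.count_eq_length.mpr (fun b hb => by
      have hbz := List.all_eq_true.mp hall b hb
      simp only [beq_iff_eq] at hbz
      exact hbz.symm)
  have hmidlen : ((row.drop p.toNat).take redsize.toNat).length = redsize.toNat := by
    simp only [List.length_take, List.length_drop]
    omega
  have hsplit1 : row.count 0 = (row.take p.toNat).count 0 + (row.drop p.toNat).count 0 := by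
    conv_lhs => rw [← List.take_append_drop p.toNat row]
    rw [List.count_append]
  have hsplit2 : (row.drop p.toNat).count 0
      = ((row.drop p.toNat).take redsize.toNat).count 0
        + (row.drop (p.toNat + redsize.toNat)).count 0 := by
    conv_lhs => rw [← List.take_append_drop redsize.toNat (row.drop p.toNat)]
    rw [List.count_append, List.drop_drop]
  have h2 : (assign row p redsize).count 0
      = (row.take p.toNat).count 0 + (row.drop (p.toNat + redsize.toNat)).count 0 := by
    unfold assign
    rw [List.count_append, List.count_append, List.count_replicate]
    simp
  omega

lemma placeFuel_irrel :
    ∀ (f1 f2 : Nat) (row : List Int), row.count 0 < f1 → row.count 0 < f2 →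
      placeFuel f1 row = placeFuel f2 row := by
  intro f1
  induction f1 with
  | zero => intro f2 row h1 _; omega
  | succ f ih =>
    intro f2 row h1 h2
    cases f2 with
    | zero => omega
    | succ g =>
      simp only [placeFuel]
      apply PySem.List.foldl_congr_mem
      intro acc rs hrs
      apply PySem.List.foldl_congr_mem
      intro acc2 pp hpp
      have hlt := assign_count_lt row rs pp hrs hpp
      rw [ih g (assign row pp rs) (by omega) (by omega)]

lemma place_eq (row : List Int) :
    place row =
      (PySem.List.pyRange 3 ((row.length : Int) + 1) 1).foldl (fun total redsize =>
        (placementsL row redsize).foldl (fun total p =>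
          total + (1 + place (assign row p redsize))) total) 0 := by
  unfold place
  conv_lhs => rw [placeFuel]
  apply PySem.List.foldl_congr_mem
  intro acc rs hrs
  apply PySem.List.foldl_congr_mem
  intro acc2 pp hpp
  have hlt := assign_count_lt row rs pp hrs hpp
  rw [placeFuel_irrel (row.count 0) ((assign row pp rs).count 0 + 1)
    (assign row pp rs) (by omega) (by omega)]

lemma foldl_nested_flat {α β γ : Type} (xs : List α) (g : α → List β)
    (h : γ → α → β → γ) (init : γ) :
    xs.foldl (fun acc a => (g a).foldl (fun acc b => h acc a b) acc) init
      = (xs.flatMap fun a => (g a).map fun b => (a, b)).foldl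
          (fun acc q => h acc q.1 q.2) init := by
  induction xs generalizing init with
  | nil => rfl
  | cons x xs ih => simp [List.foldl_append, List.foldl_map, ih]

lemma buildPre_from :
    ∀ (row pre : List Int) (c : Int), pre.getLast? = some c →
      row.foldl (fun pre x =>
          pre ++ [PySem.List.pyGetD pre (-1) 0 + (if x == 0 then 1 else 0)]) pre
        = pre ++ (List.range row.length).map
            (fun j => c + ((row.take (j + 1)).count 0 : Int)) := by
  intro row
  induction row with
  | nil => simp
  | cons x row ih =>
    intro pre c h
    have hne : pre ≠ [] := by rintro rfl; simp at h
    have hlast : pre.getLast hne = c := by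
      have := List.getLast?_eq_some_getLast (l := pre) hne
      rw [h] at this; exact (Option.some_inj.mp this).symm
    simp only [List.foldl_cons, PySem.List.pyGetD_neg_one pre 0 hne, hlast]
    rw [ih (pre ++ [c + (if x == 0 then 1 else 0)]) (c + (if x == 0 then 1 else 0)) (by simp)]
    have hfun : (fun j => (c + (if x == 0 then 1 else 0)) + ((List.count 0 (row.take (j+1)) : Int)))
        = ((fun j => c + ((List.count 0 ((x :: row).take (j+1)) : Int))) ∘ Nat.succ) := by
      funext j
      simp only [Function.comp_apply, List.take_succ_cons, List.count_cons]
      by_cases hx : x = 0 <;> (push_cast; simp [hx]; try ring)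
    have hhead : c + (if x == 0 then 1 else 0)
        = c + ((List.count 0 ((x :: row).take (0+1)) : Int)) := by
      by_cases hx : x = 0 <;> simp [hx]
    rw [List.length_cons, List.range_succ_eq_map, List.map_cons, List.map_map, ← hfun, ← hhead]
    simp

lemma buildPre_eq (row : List Int) :
    row.foldl (fun pre x =>
        pre ++ [PySem.List.pyGetD pre (-1) 0 + (if x == 0 then 1 else 0)]) [0]
      = (List.range (row.length + 1)).map (fun j => ((row.take j).count 0 : Int)) := by
  rw [buildPre_from row [0] 0 (by simp)]
  rw [List.range_succ_eq_map, List.map_cons, List.map_map]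
  simp

lemma pre_getD (row : List Int) (j : Int) (h0 : 0 ≤ j) (hj : j ≤ (row.length : Int)) :
    PySem.List.pyGetD (row.foldl (fun pre x =>
        pre ++ [PySem.List.pyGetD pre (-1) 0 + (if x == 0 then 1 else 0)]) [0]) j 0
      = ((row.take j.toNat).count 0 : Int) := by
  rw [buildPre_eq]
  have hjn : j = ((j.toNat : Nat) : Int) := by omega
  rw [hjn, PySem.List.pyGetD_natCast]
  rw [PySem.List.getD_map_range _ _ _ _ (by omega)]
  have h2 : ((j.toNat : Int)).toNat = j.toNat := by omega
  rw [h2]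

lemma concat_eq_assign (row : List Int) (redsize i : Int) (hi : 0 ≤ i) (h3 : 3 ≤ redsize) :
    PySem.List.slice row none (some i) ++ List.replicate redsize.toNat 1
      ++ PySem.List.slice row (some (i + redsize)) none = assign row i redsize := by
  rw [PySem.List.slice_to row hi, PySem.List.slice_from row (by omega : (0:Int) ≤ i + redsize)]
  unfold assign
  have : (i + redsize).toNat = i.toNat + redsize.toNat := by omega
  rw [this, List.append_assoc]

lemma cond_eq (row : List Int) (redsize i : Int) (h3 : 3 ≤ redsize)
    (hrs : redsize ≤ (row.length : Int)) (hi : 0 ≤ i)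
    (hil : i ≤ (row.length : Int) - redsize) :
    (PySem.List.pyGetD (row.foldl (fun pre x =>
        pre ++ [PySem.List.pyGetD pre (-1) 0 + (if x == 0 then 1 else 0)]) [0]) (i + redsize) 0
      - PySem.List.pyGetD (row.foldl (fun pre x =>
        pre ++ [PySem.List.pyGetD pre (-1) 0 + (if x == 0 then 1 else 0)]) [0]) i 0 == redsize)
    = (PySem.List.slice row (some i) (some (i + redsize))).all (fun r => r == 0) := by
  rw [pre_getD row (i + redsize) (by omega) (by omega), pre_getD row i hi (by omega)]
  rw [PySem.List.slice_toNat row hi (by omega)]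
  have hkk : (i + redsize).toNat = i.toNat + redsize.toNat := by omega
  rw [hkk]
  have hsplit : (row.take (i.toNat + redsize.toNat)).count 0
      = (row.take i.toNat).count 0 + ((row.drop i.toNat).take redsize.toNat).count 0 := by
    rw [List.take_add, List.count_append]
  have hmidlen : ((row.drop i.toNat).take redsize.toNat).length = redsize.toNat := by
    simp only [List.length_take, List.length_drop]
    omega
  have hshape : (i.toNat + redsize.toNat) - i.toNat = redsize.toNat := by omega
  rw [hshape, hsplit]
  apply Bool.eq_iff_iff.mpr
  rw [beq_iff_eq, List.all_eq_true]
  constructor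
  · intro h b hb
    have hcnt : ((row.drop i.toNat).take redsize.toNat).count 0 = redsize.toNat := by omega
    have := List.count_eq_length.mp (by rw [hcnt, hmidlen]) b hb
    simp [← this]
  · intro h
    have : ((row.drop i.toNat).take redsize.toNat).count 0
        = ((row.drop i.toNat).take redsize.toNat).length := by
      apply List.count_eq_length.mpr
      intro b hb
      have := h b hb
      simp only [beq_iff_eq] at this
      exact this.symm
    rw [this, hmidlen]
    omega

-- proof-only canonical form of the memoized recursion (A-shaped loops, same cache
-- discipline); placeMemo is proved equal to it, and it is proved equal to place.
def placeMemoC : Nat → List Int → PySem.Dict (List Int) Int →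
    Int × PySem.Dict (List Int) Int
  | 0, _, cache => (0, cache)
  | fuel + 1, row, cache =>
    match cache.get? row with
    | some v => (v, cache)
    | none =>
      let res :=
        (PySem.List.pyRange 3 ((row.length : Int) + 1) 1).foldl
          (fun (tc : Int × PySem.Dict (List Int) Int) redsize =>
            (placementsL row redsize).foldl (fun tc p =>
              let vc := placeMemoC fuel (assign row p redsize) tc.2
              (tc.1 + (1 + vc.1), vc.2)) tc) (0, cache)
      (res.1, res.2.insert row res.1)

def CacheOK (c : PySem.Dict (List Int) Int) : Prop :=
  ∀ k v, c.get? k = some v → v = place k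

lemma memo_fold (f : Nat)
    (ih : ∀ (row : List Int) cache, row.count 0 < f → CacheOK cache →
      (placeMemoC f row cache).1 = place row ∧ CacheOK (placeMemoC f row cache).2) :
    ∀ (qs : List (Int × Int)) (row : List Int) (t : Int)
      (c : PySem.Dict (List Int) Int),
      CacheOK c → (∀ q ∈ qs, (assign row q.2 q.1).count 0 < f) →
      (qs.foldl (fun tc q =>
          (tc.1 + (1 + (placeMemoC f (assign row q.2 q.1) tc.2).1),
           (placeMemoC f (assign row q.2 q.1) tc.2).2)) (t, c)).1
        = qs.foldl (fun t q => t + (1 + place (assign row q.2 q.1))) t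
      ∧ CacheOK (qs.foldl (fun tc q =>
          (tc.1 + (1 + (placeMemoC f (assign row q.2 q.1) tc.2).1),
           (placeMemoC f (assign row q.2 q.1) tc.2).2)) (t, c)).2 := by
  intro qs
  induction qs with
  | nil => exact fun row t c hc _ => ⟨rfl, hc⟩
  | cons q qs ihq =>
    intro row t c hc hlt
    simp only [List.foldl_cons]
    obtain ⟨hv, hc'⟩ := ih (assign row q.2 q.1) c (hlt q (List.mem_cons_self ..)) hc
    rw [hv]
    exact ihq row (t + (1 + place (assign row q.2 q.1)))
      ((placeMemoC f (assign row q.2 q.1) c).2) hc'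
      (fun q' hq' => hlt q' (List.mem_cons_of_mem _ hq'))

lemma memo_correct :
    ∀ (fuel : Nat) (row : List Int) (cache : PySem.Dict (List Int) Int),
      row.count 0 < fuel → CacheOK cache →
      (placeMemoC fuel row cache).1 = place row ∧ CacheOK (placeMemoC fuel row cache).2 := by
  intro fuel
  induction fuel with
  | zero => intro row cache h; omega
  | succ f ih =>
    intro row cache h hc
    simp only [placeMemoC]
    cases hg : cache.get? row with
    | some v =>
      simp only
      exact ⟨hc row v hg, hc⟩
    | none =>
      simp only
      rw [foldl_nested_flat]
      set qs := (PySem.List.pyRange 3 ((row.length : Int) + 1) 1).flatMap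
        (fun rs => (placementsL row rs).map fun p => (rs, p)) with hqs
      have hqlt : ∀ q ∈ qs, (assign row q.2 q.1).count 0 < f := by
        intro q hq
        rw [hqs] at hq
        simp only [List.mem_flatMap, List.mem_map] at hq
        obtain ⟨rs, hrs, p, hp, rfl⟩ := hq
        have := assign_count_lt row rs p hrs hp
        dsimp only
        omega
      obtain ⟨h1, h2⟩ := memo_fold f ih qs row 0 cache hc hqlt
      have hplace : place row = qs.foldl
          (fun t q => t + (1 + place (assign row q.2 q.1))) 0 := by
        rw [place_eq, foldl_nested_flat]
      refine ⟨by rw [h1, hplace], ?_⟩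
      intro k v hkv
      rw [PySem.Dict.get?_insert] at hkv
      split at hkv
      · next hk =>
          subst hk
          cases hkv
          rw [h1]
          exact hplace.symm
      · exact h2 k v hkv

-- B's inner loop (if-guarded fold over all positions) is the fold over placementsL
lemma inner_eq (f : Nat) (row : List Int) (redsize : Int)
    (hrs : redsize ∈ PySem.List.pyRange 3 ((row.length : Int) + 1) 1)
    (tc : Int × PySem.Dict (List Int) Int) :
    (PySem.List.pyRange 0 (((row.length : Int) - redsize) + 1) 1).foldl (fun tc i =>
      if (PySem.List.pyGetD (row.foldl (fun pre x =>
            pre ++ [PySem.List.pyGetD pre (-1) 0 + (if x == 0 then 1 else 0)]) [0]) (i + redsize) 0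
          - PySem.List.pyGetD (row.foldl (fun pre x =>
            pre ++ [PySem.List.pyGetD pre (-1) 0 + (if x == 0 then 1 else 0)]) [0]) i 0 == redsize)
          && ((i == 0 || PySem.List.pyGetD row (i - 1) 0 == 0)
          && (i == (row.length : Int) - redsize
              || PySem.List.pyGetD row (((row.length : Int) - redsize) + 1) 0 == 0)) then
        (tc.1 + (1 + (placeMemo f (PySem.List.slice row none (some i)
            ++ List.replicate redsize.toNat 1
            ++ PySem.List.slice row (some (i + redsize)) none) tc.2).1),
         (placeMemo f (PySem.List.slice row none (some i)
            ++ List.replicate redsize.toNat 1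
            ++ PySem.List.slice row (some (i + redsize)) none) tc.2).2)
      else tc) tc
    = (placementsL row redsize).foldl (fun tc p =>
        (tc.1 + (1 + (placeMemo f (assign row p redsize) tc.2).1),
         (placeMemo f (assign row p redsize) tc.2).2)) tc := by
  rw [PySem.List.mem_pyRange_one] at hrs
  rw [PySem.List.foldl_if_eq_foldl_filter]
  have hfil : (PySem.List.pyRange 0 (((row.length : Int) - redsize) + 1) 1).filter (fun i =>
      (PySem.List.pyGetD (row.foldl (fun pre x =>
            pre ++ [PySem.List.pyGetD pre (-1) 0 + (if x == 0 then 1 else 0)]) [0]) (i + redsize) 0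
          - PySem.List.pyGetD (row.foldl (fun pre x =>
            pre ++ [PySem.List.pyGetD pre (-1) 0 + (if x == 0 then 1 else 0)]) [0]) i 0 == redsize)
          && ((i == 0 || PySem.List.pyGetD row (i - 1) 0 == 0)
          && (i == (row.length : Int) - redsize
              || PySem.List.pyGetD row (((row.length : Int) - redsize) + 1) 0 == 0)))
      = placementsL row redsize := by
    unfold placementsL
    apply List.filter_congr
    intro i hi
    rw [PySem.List.mem_pyRange_one] at hi
    rw [cond_eq row redsize i (by omega) (by omega) (by omega) (by omega)]
  rw [hfil]
  apply PySem.List.foldl_congr_mem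
  intro acc p hp
  have hp0 : 0 ≤ p := by
    unfold placementsL at hp
    simp only [List.mem_filter, PySem.List.mem_pyRange_one] at hp
    exact hp.1.1
  rw [concat_eq_assign row redsize p hp0 (by omega)]


lemma placeMemo_eq_C :
    ∀ (fuel : Nat) (row : List Int) (cache : PySem.Dict (List Int) Int),
      placeMemo fuel row cache = placeMemoC fuel row cache := by
  intro fuel
  induction fuel with
  | zero => intro row cache; rfl
  | succ f ih =>
    intro row cache
    simp only [placeMemo, placeMemoC]
    cases hg : cache.get? row with
    | some v =>
      have hct : cache.contains row = true := by
        rw [PySem.Dict.contains_eq_isSome_get?, hg]; rfl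
      rw [if_pos hct, PySem.Dict.getD_eq_get?_getD, hg]
      rfl
    | none =>
      have hct : cache.contains row = false := by
        rw [PySem.Dict.contains_eq_isSome_get?, hg]; rfl
      rw [if_neg (by simp [hct])]
      dsimp only
      refine congrArg (fun r : Int × PySem.Dict (List Int) Int =>
        (r.1, r.2.insert row r.1)) ?_
      apply PySem.List.foldl_congr_mem
      intro acc rs hrs
      rw [inner_eq f row rs hrs acc]
      apply PySem.List.foldl_congr_mem
      intro acc2 p _
      rw [ih]

-- ===== VERDICT (by name: the statement is the Claim_ definition above) =====
theorem place_spec : Claim_equal_place := by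
  intro row _
  unfold Spec_place place_alt
  rw [placeMemo_eq_C]
  exact ((memo_correct _ row PySem.Dict.empty (Nat.lt_succ_self _)
    (fun k v h => by simp [PySem.Dict.get?_empty] at h)).1).symm
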